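-- pv_equiv track=rewrite | github.com/IngeRi92/python-study-progress | Andmestruktuurid/find_odd_numbers.py | find_odd_numbers
-- ===== SOURCE A (Python) =====
-- def find_odd_numbers(set_a: set, set_b: set) -> set:
--     """
--     Given two set, return a set containing the odd numbers that are in set_a or in st_b, but not in both.
--
--     find_odd_numbers({1, 2, 3}, {3, 4, 5}) -> {1, 5}
--     """
--     result = set()
--     for num in set_a:
--         if num % 2 == 1 and num not in set_b:
--             result.add(num)
--     for num in set_b:
--         if num % 2 == 1 and num not in set_a:
--             result.add(num)
--     return result
-- ===== SOURCE B (Python) =====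
-- def find_odd_numbers(set_a: set, set_b: set) -> set:
--     # Count occurrences across both sets; an element lies in exactly one set
--     # iff its total count is 1 (sets hold each element at most once).
--     counts = {}
--     for n in list(set_a) + list(set_b):
--         counts[n] = counts.get(n, 0) + 1
--     return {n for n, c in counts.items() if c == 1 and n % 2 == 1}
-- ===== Notes on version B (the rewrite author's own statement) =====
-- stated objective: alternative
-- what changed: B replaces A's two membership-testing scans (each checking 'not in the other set') with an occurrence-counting algorithm: it builds one counter over the concatenation of both sets and keeps the odd keys whose total count is exactly 1, so no membership test against either set is ever performed.
import Mathlib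
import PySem

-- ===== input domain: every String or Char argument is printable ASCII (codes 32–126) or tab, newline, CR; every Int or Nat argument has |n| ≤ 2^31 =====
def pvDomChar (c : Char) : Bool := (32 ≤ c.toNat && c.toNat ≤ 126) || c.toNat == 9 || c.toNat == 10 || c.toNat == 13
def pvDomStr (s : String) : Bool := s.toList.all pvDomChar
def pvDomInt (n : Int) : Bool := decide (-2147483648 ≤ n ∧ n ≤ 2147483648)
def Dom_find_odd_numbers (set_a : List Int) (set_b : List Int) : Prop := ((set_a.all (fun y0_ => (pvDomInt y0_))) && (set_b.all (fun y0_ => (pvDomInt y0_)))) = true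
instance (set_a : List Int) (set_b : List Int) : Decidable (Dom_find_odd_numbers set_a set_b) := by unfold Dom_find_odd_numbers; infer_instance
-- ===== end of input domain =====

-- B re-implements A by occurrence counting: one counter over both sets, keep odd keys with
-- total count exactly 1, instead of A's two scans each testing membership in the other set (alternative).


-- ===== PORT A =====
def find_odd_numbers (set_a : List Int) (set_b : List Int) : List Int :=
  let result : PySem.Set Int := PySem.Set.empty
  let result := set_a.foldl (fun result num =>
    if PySem.Int.mod num 2 == 1 && !(PySem.Set.contains set_b num)
    then PySem.Set.add result num else result) result
  let result := set_b.foldl (fun result num =>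
    if PySem.Int.mod num 2 == 1 && !(PySem.Set.contains set_a num)
    then PySem.Set.add result num else result) result
  result

-- ===== PORT B =====
def find_odd_numbers_alt (set_a : List Int) (set_b : List Int) : List Int :=
  let counts := (set_a ++ set_b).foldl
    (fun (d : PySem.Dict Int Int) n => d.insert n (d.getD n 0 + 1)) PySem.Dict.empty
  counts.items.foldl
    (fun (r : PySem.Set Int) p =>
      if p.2 == 1 && PySem.Int.mod p.1 2 == 1 then PySem.Set.add r p.1 else r)
    PySem.Set.empty

-- ===== PRECONDITION & SPEC =====
-- The parameters are Python sets; a List Int models a set only when its elements are distinct,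
-- so Pre_ requires both lists to be duplicate-free (no representable Python input is excluded).
def Pre_find_odd_numbers (set_a : List Int) (set_b : List Int) : Prop :=
  set_a.Nodup ∧ set_b.Nodup
instance (set_a : List Int) (set_b : List Int) : Decidable (Pre_find_odd_numbers set_a set_b) := by
  unfold Pre_find_odd_numbers; infer_instance

def pvWitness_find_odd_numbers : List Int × List Int := ([1, 2, 3], [3, 4, 5])

def Spec_find_odd_numbers (set_a : List Int) (set_b : List Int) (out : List Int) : Prop := out = find_odd_numbers_alt set_a set_b
instance (set_a : List Int) (set_b : List Int) (out : List Int) : Decidable (Spec_find_odd_numbers set_a set_b out) := by unfold Spec_find_odd_numbers; infer_instance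

-- ===== CLAIM (what is proved, stated in full; the proofs are below) =====
def Claim_equal_find_odd_numbers : Prop := ∀ (set_a : List Int) (set_b : List Int), Dom_find_odd_numbers set_a set_b → Pre_find_odd_numbers set_a set_b → Spec_find_odd_numbers set_a set_b (find_odd_numbers set_a set_b)

-- ===== LEMMAS AND PROOFS =====

theorem foldl_eq_update (s : PySem.Set Int) (l : List Int) :
    List.foldl PySem.Set.add s l = PySem.Set.update s l := rfl

theorem find_odd_numbers_eq_alt (set_a set_b : List Int)
    (ha : set_a.Nodup) (hb : set_b.Nodup) :
    find_odd_numbers set_a set_b = find_odd_numbers_alt set_a set_b := by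
  unfold find_odd_numbers find_odd_numbers_alt
  simp only [PySem.Dict.foldl_insert_getD_add_one_eq_counter, PySem.Dict.items_counter,
    List.foldl_map, PySem.List.foldl_if_eq_foldl_filter, foldl_eq_update,
    PySem.Set.update_empty]
  have hdisj : ∀ x ∈ List.filter (fun x => PySem.Int.mod x 2 == 1 && !PySem.Set.contains set_a x) set_b,
      x ∉ List.filter (fun x => PySem.Int.mod x 2 == 1 && !PySem.Set.contains set_b x) set_a := by
    intro x hx hx'
    have h1 := List.of_mem_filter hx
    have h2 := List.mem_of_mem_filter hx'
    simp only [Bool.and_eq_true, Bool.not_eq_true'] at h1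
    have hxa : PySem.Set.contains set_a x = true := (PySem.Set.contains_iff set_a x).mpr h2
    rw [h1.2] at hxa
    exact Bool.false_ne_true hxa
  -- LHS → plain append
  rw [PySem.Set.ofList_eq_self_of_nodup _ (ha.filter _),
      PySem.Set.update_eq_append_of_disjoint _ _ (hb.filter _) hdisj]
  -- RHS → plain filters
  rw [PySem.Set.ofList_append, PySem.Set.update_eq_append_filter,
      PySem.Set.ofList_eq_self_of_nodup set_a ha, PySem.Set.ofList_eq_self_of_nodup set_b hb,
      List.filter_append, List.filter_filter]
  -- the two filter predicates coincide on their lists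
  have hQa : ∀ x ∈ set_a, ((List.count x (set_a ++ set_b) : Int) == 1 && (PySem.Int.mod x 2 == 1))
      = (PySem.Int.mod x 2 == 1 && !PySem.Set.contains set_b x) := by
    intro x hx
    have hca : List.count x set_a = 1 := List.count_eq_one_of_mem ha hx
    by_cases hxb : x ∈ set_b
    · have h1 : 1 ≤ List.count x set_b := List.one_le_count_iff.mpr hxb
      simp [List.count_append, hca, hxb, beq_iff_eq]
      omega
    · have h0 : List.count x set_b = 0 := List.count_eq_zero.mpr hxb
      simp [List.count_append, hca, h0, hxb]
  have hQb : ∀ x ∈ set_b, ((List.count x (set_a ++ set_b) : Int) == 1 && (PySem.Int.mod x 2 == 1) && !PySem.Set.contains set_a x)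
      = (PySem.Int.mod x 2 == 1 && !PySem.Set.contains set_a x) := by
    intro x hx
    have hcb : List.count x set_b = 1 := List.count_eq_one_of_mem hb hx
    by_cases hxa : x ∈ set_a
    · simp [hxa]
    · have h0 : List.count x set_a = 0 := List.count_eq_zero.mpr hxa
      simp [List.count_append, hcb, h0, hxa]
  rw [List.filter_congr hQa, List.filter_congr hQb]
  rw [PySem.Set.ofList_eq_self_of_nodup]
  exact List.Nodup.append (ha.filter _) (hb.filter _) (fun x hx1 hx2 => hdisj x hx2 hx1)

-- ===== VERDICT (by name: the statement is the Claim_ definition above) =====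
theorem find_odd_numbers_spec : Claim_equal_find_odd_numbers := by
  intro set_a set_b _ hpre
  exact find_odd_numbers_eq_alt set_a set_b hpre.1 hpre.2
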